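-- pv_equiv track=rewrite | github.com/jcolinpatrick/kryptos | scripts/grille/e_transposition_then_morse_mask.py | gen_timed_waveform
-- ===== SOURCE A (Python) =====
-- MORSE = {
--     'A': '.-',    'B': '-...',  'C': '-.-.',  'D': '-..',
--     'E': '.',     'F': '..-.',  'G': '--.',   'H': '....',
--     'I': '..',    'J': '.---',  'K': '-.-',   'L': '.-..',
--     'M': '--',    'N': '-.',    'O': '---',   'P': '.--.',
--     'Q': '--.-',  'R': '.-.',   'S': '...',   'T': '-',
--     'U': '..-',   'V': '...-',  'W': '.--',   'X': '-..-',
--     'Y': '-.--',  'Z': '--..',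
-- }
--
-- def gen_timed_waveform(tokens):
--     bits = []
--     for i, t in enumerate(tokens):
--         morse = MORSE[t.upper()]
--         for j, sym in enumerate(morse):
--             if sym == '.':
--                 bits.extend([1])
--             else:
--                 bits.extend([1, 1, 1])
--             if j < len(morse) - 1:
--                 bits.extend([0])
--         if i < len(tokens) - 1:
--             bits.extend([0, 0, 0])
--     return bits
-- ===== SOURCE B (Python) =====
-- MORSE = {
--     'A': '.-',    'B': '-...',  'C': '-.-.',  'D': '-..',
--     'E': '.',     'F': '..-.',  'G': '--.',   'H': '....',
--     'I': '..',    'J': '.---',  'K': '-.-',   'L': '.-..',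
--     'M': '--',    'N': '-.',    'O': '---',   'P': '.--.',
--     'Q': '--.-',  'R': '.-.',   'S': '...',   'T': '-',
--     'U': '..-',   'V': '...-',  'W': '.--',   'X': '-..-',
--     'Y': '-.--',  'Z': '--..',
-- }
--
-- SEG = {'.': '1', '-': '111', ' ': '0'}
--
--
-- def gen_timed_waveform(tokens):
--     # Stage 1: one flat Morse string, letters separated by a space.
--     text = " ".join(MORSE[t.upper()] for t in tokens)
--     # Stage 2: each character becomes a digit segment ('.'->'1', '-'->'111',
--     # ' '->'0'), joined with a single '0'; the space segment plus its two
--     # surrounding join-zeros yields the three-zero letter gap.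
--     digits = "0".join(SEG[ch] for ch in text)
--     # Stage 3: parse the digit string into the bit list.
--     return [int(d) for d in digits]
-- ===== Notes on version B (the rewrite author's own statement) =====
-- stated objective: alternative
-- what changed: B is a staged string pipeline: it joins the tokens' Morse codes into one space-separated string, translates each character ('.'->'1', '-'->'111', ' '->'0') and joins the segments with a single '0', then parses the digit string into the bit list, instead of A's single accumulator loop with indexed lookahead gap tests.
import Mathlib
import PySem

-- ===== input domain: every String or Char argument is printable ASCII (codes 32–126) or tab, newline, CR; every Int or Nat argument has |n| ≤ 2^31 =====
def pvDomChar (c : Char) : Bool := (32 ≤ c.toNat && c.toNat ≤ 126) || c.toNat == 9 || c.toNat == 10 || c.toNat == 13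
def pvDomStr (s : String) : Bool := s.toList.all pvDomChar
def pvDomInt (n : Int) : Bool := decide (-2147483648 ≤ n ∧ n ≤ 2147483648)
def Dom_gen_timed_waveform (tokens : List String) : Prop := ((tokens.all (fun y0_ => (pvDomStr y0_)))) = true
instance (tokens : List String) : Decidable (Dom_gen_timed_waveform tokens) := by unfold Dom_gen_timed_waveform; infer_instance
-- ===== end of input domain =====

-- B builds one flat Morse string (letters joined by a space), translates each character to a digit
-- segment joined by single '0's, and parses the digits — three staged passes instead of A's
-- single accumulator loop with indexed lookahead gap tests; same asymptotic cost.

-- shared module constant: the Morse table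
def MORSE : PySem.Dict String String := PySem.Dict.ofList
  [("A", ".-"), ("B", "-..."), ("C", "-.-."), ("D", "-.."),
   ("E", "."), ("F", "..-."), ("G", "--."), ("H", "...."),
   ("I", ".."), ("J", ".---"), ("K", "-.-"), ("L", ".-.."),
   ("M", "--"), ("N", "-."), ("O", "---"), ("P", ".--."),
   ("Q", "--.-"), ("R", ".-."), ("S", "..."), ("T", "-"),
   ("U", "..-"), ("V", "...-"), ("W", ".--"), ("X", "-..-"),
   ("Y", "-.--"), ("Z", "--..")]

-- ===== PORT A =====
-- inner loop 'for j, sym in enumerate(morse)' with the trailing [0] on all but the last symbol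
def pvInnerA (n : Nat) (bits : List Int) (j : Nat) : List Char → List Int
  | [] => bits
  | sym :: rest =>
      let bits := if sym = '.' then bits ++ [1] else bits ++ [1, 1, 1]
      let bits := if j < n - 1 then bits ++ [0] else bits
      pvInnerA n bits (j + 1) rest

-- outer loop 'for i, t in enumerate(tokens)'; MORSE[t.upper()] raises KeyError on a missing key,
-- excluded by Pre_ (the '.getD ""' is never reached inside Pre_)
def pvOuterA (n : Nat) (bits : List Int) (i : Nat) : List String → List Int
  | [] => bits
  | t :: ts =>
      let morse := ((MORSE.get? (PySem.Str.upper t)).getD "").toList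
      let bits := pvInnerA morse.length bits 0 morse
      let bits := if i < n - 1 then bits ++ [0, 0, 0] else bits
      pvOuterA n bits (i + 1) ts

def gen_timed_waveform (tokens : List String) : List Int :=
  pvOuterA tokens.length [] 0 tokens

-- ===== PORT B =====
-- SEG = {'.': '1', '-': '111', ' ': '0'}; SEG[ch] never misses under Pre_ (the '.getD ""' is unreached)
def SEG : PySem.Dict String String := PySem.Dict.ofList [(".", "1"), ("-", "111"), (" ", "0")]

def gen_timed_waveform_alt (tokens : List String) : List Int :=
  let text := PySem.Str.join " " (tokens.map (fun t => (MORSE.get? (PySem.Str.upper t)).getD ""))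
  let digits := PySem.Str.join "0" (text.toList.map (fun ch => (SEG.get? (String.ofList [ch])).getD ""))
  digits.toList.map (fun d => (PySem.Int.ofStr? (String.ofList [d])).getD 0)

-- ===== PRECONDITION & SPEC =====
-- Pre_: every token's uppercase form is a key of MORSE (otherwise the Python raises KeyError)
def Pre_gen_timed_waveform (tokens : List String) : Prop :=
  ∀ t ∈ tokens, (MORSE.get? (PySem.Str.upper t)).isSome = true
instance (tokens : List String) : Decidable (Pre_gen_timed_waveform tokens) := by
  unfold Pre_gen_timed_waveform; infer_instance

def pvWitness_gen_timed_waveform : List String := ["s", "O", "s"]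

def Spec_gen_timed_waveform (tokens : List String) (out : List Int) : Prop :=
  out = gen_timed_waveform_alt tokens
instance (tokens : List String) (out : List Int) : Decidable (Spec_gen_timed_waveform tokens out) := by
  unfold Spec_gen_timed_waveform; infer_instance

-- ===== CLAIM (what is proved, stated in full; the proofs are below) =====
def Claim_equal_gen_timed_waveform : Prop :=
  ∀ (tokens : List String), Dom_gen_timed_waveform tokens →
    Pre_gen_timed_waveform tokens →
    Spec_gen_timed_waveform tokens (gen_timed_waveform tokens)

-- ===== LEMMAS AND PROOFS =====

-- reference: join a list of chunks with a separator
def pvJoin {α : Type} (sep : List α) : List (List α) → List α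
  | [] => []
  | [x] => x
  | x :: y :: xs => x ++ sep ++ pvJoin sep (y :: xs)

theorem chars_join_eq_pvJoin (sep : List Char) (ls : List (List Char)) :
    PySem.Chars.join sep ls = pvJoin sep ls := by
  induction ls with
  | nil => simp [pvJoin, PySem.Chars.join_nil]
  | cons x xs ih =>
      cases xs with
      | nil => simp [pvJoin, PySem.Chars.join_singleton]
      | cons y ys =>
          rw [PySem.Chars.join_cons_cons]
          simp only [pvJoin]
          rw [ih]

theorem pvJoin_cons {α : Type} (sep x : List α) (xs : List (List α)) :
    pvJoin sep (x :: xs) = x ++ xs.flatMap (fun l => sep ++ l) := by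
  induction xs generalizing x with
  | nil => simp [pvJoin]
  | cons y ys ih => simp [pvJoin, ih y, List.flatMap_cons]

theorem pvJoin_ne {α : Type} (sep x : List α) (xs : List (List α)) (hx : x ≠ []) :
    pvJoin sep (x :: xs) ≠ [] := by
  rw [pvJoin_cons]
  intro h
  simp only [List.append_eq_nil_iff] at h
  exact hx h.1

theorem pvJoin_map {α β : Type} (f : α → β) (sep : List α) (ls : List (List α)) :
    (pvJoin sep ls).map f = pvJoin (sep.map f) (ls.map (List.map f)) := by
  induction ls with
  | nil => simp [pvJoin]
  | cons x xs ih =>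
      cases xs with
      | nil => simp [pvJoin]
      | cons y ys => simp only [pvJoin, List.map_cons, List.map_append, ih]

theorem pvJoin_split {α : Type} (sep : List α) (l1 l2 : List (List α))
    (h1 : l1 ≠ []) (h2 : l2 ≠ []) :
    pvJoin sep (l1 ++ l2) = pvJoin sep l1 ++ sep ++ pvJoin sep l2 := by
  induction l1 with
  | nil => exact absurd rfl h1
  | cons x xs ih =>
      cases xs with
      | nil =>
          cases l2 with
          | nil => exact absurd rfl h2
          | cons y ys => simp [pvJoin]
      | cons x' xs' =>
          have := ih (by simp)
          simp only [List.cons_append, pvJoin] at *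
          rw [this]
          simp [List.append_assoc]

-- the per-character segment, as a bit list (B's SEG[ch] followed by int())
def pvSegB (c : Char) : List Int :=
  (((SEG.get? (String.ofList [c])).getD "").toList).map
    (fun d => (PySem.Int.ofStr? (String.ofList [d])).getD 0)

-- A's per-symbol segment
def pvSeg (sym : Char) : List Int := if sym = '.' then [1] else [1, 1, 1]

-- the code of a token, as chars
def pvCode (t : String) : List Char := ((MORSE.get? (PySem.Str.upper t)).getD "").toList

-- A's result characterised as a nested join
theorem pvInnerA_eq (n : Nat) :
    ∀ (cs : List Char) (j : Nat) (bits : List Int), j + cs.length = n →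
      pvInnerA n bits j cs = bits ++ pvJoin [0] (cs.map pvSeg) := by
  intro cs
  induction cs with
  | nil => intro j bits _; simp [pvInnerA, pvJoin]
  | cons c rest ih =>
      intro j bits hn
      simp only [List.length_cons] at hn
      show pvInnerA n
        (if j < n - 1 then (if c = '.' then bits ++ [1] else bits ++ [1, 1, 1]) ++ [0]
         else (if c = '.' then bits ++ [1] else bits ++ [1, 1, 1])) (j + 1) rest
        = bits ++ pvJoin [0] ((c :: rest).map pvSeg)
      have hseg : (if c = '.' then bits ++ [1] else bits ++ [1, 1, 1]) = bits ++ pvSeg c := by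
        unfold pvSeg; split <;> rfl
      cases rest with
      | nil =>
          have : ¬ j < n - 1 := by simp at hn; omega
          simp [pvInnerA, this, hseg, pvJoin]
      | cons r rs =>
          have hlt : j < n - 1 := by simp at hn; omega
          rw [if_pos hlt, hseg,
            ih (j + 1) (bits ++ pvSeg c ++ [0]) (by simp at hn ⊢; omega)]
          simp [pvJoin]

theorem pvOuterA_eq (n : Nat) :
    ∀ (ts : List String) (i : Nat) (bits : List Int), i + ts.length = n →
      pvOuterA n bits i ts
        = bits ++ pvJoin [0, 0, 0] (ts.map (fun t => pvJoin [0] ((pvCode t).map pvSeg))) := by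
  intro ts
  induction ts with
  | nil => intro i bits _; simp [pvOuterA, pvJoin]
  | cons t ts ih =>
      intro i bits hn
      simp only [List.length_cons] at hn
      show pvOuterA n
        (if i < n - 1 then pvInnerA _ bits 0 (pvCode t) ++ [0, 0, 0]
         else pvInnerA _ bits 0 (pvCode t)) (i + 1) ts
        = bits ++ pvJoin [0, 0, 0] ((t :: ts).map (fun t => pvJoin [0] ((pvCode t).map pvSeg)))
      rw [pvInnerA_eq _ _ 0 bits (by simp [pvCode])]
      cases ts with
      | nil =>
          have : ¬ i < n - 1 := by simp at hn; omega
          simp [pvOuterA, this, pvJoin]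
      | cons t' ts' =>
          have hlt : i < n - 1 := by simp at hn; omega
          rw [if_pos hlt, ih (i + 1) _ (by simp at hn ⊢; omega)]
          simp [pvJoin]

-- Morse codes are non-empty and consist of '.' and '-' only
theorem pvMorse_items_wf :
    MORSE.items.all
      (fun p => !p.2.toList.isEmpty && p.2.toList.all (fun c => c == '.' || c == '-')) = true := by
  rfl

theorem pvCode_wf (t : String) (h : (MORSE.get? (PySem.Str.upper t)).isSome = true) :
    pvCode t ≠ [] ∧ ∀ c ∈ pvCode t, c = '.' ∨ c = '-' := by
  obtain ⟨v, hv⟩ := Option.isSome_iff_exists.mp h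
  have hmem := PySem.Dict.mem_items_of_get?_eq_some _ hv
  have hall := List.all_eq_true.mp pvMorse_items_wf _ hmem
  simp only [Bool.and_eq_true, Bool.not_eq_true', List.isEmpty_eq_false_iff,
    List.all_eq_true, beq_iff_eq, Bool.or_eq_true] at hall
  simpa [pvCode, hv] using hall

theorem pvSegB_space : pvSegB ' ' = [0] := by decide
theorem pvSegB_eq_pvSeg (c : Char) (h : c = '.' ∨ c = '-') : pvSegB c = pvSeg c := by
  rcases h with rfl | rfl <;> decide

-- central lemma: joining the space-separated character stream with single zeros
-- equals joining the per-letter encodings with triple zeros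
theorem pvJoin_chars_eq (codes : List (List Char))
    (h : ∀ cs ∈ codes, cs ≠ [] ∧ ∀ c ∈ cs, c = '.' ∨ c = '-') :
    pvJoin [0] ((pvJoin [' '] codes).map pvSegB)
      = pvJoin [0, 0, 0] (codes.map (fun cs => pvJoin [0] (cs.map pvSeg))) := by
  induction codes with
  | nil => simp [pvJoin]
  | cons c cs ih =>
      have hc := h c (by simp)
      have hmapc : c.map pvSegB = c.map pvSeg :=
        List.map_congr_left (fun x hx => pvSegB_eq_pvSeg x (hc.2 x hx))
      cases cs with
      | nil => simp [pvJoin, hmapc]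
      | cons c' cs' =>
          have hrest : ∀ x ∈ c' :: cs', x ≠ [] ∧ ∀ ch ∈ x, ch = '.' ∨ ch = '-' := by
            intro x hx; exact h x (by simp [hx])
          have hc' := hrest c' (by simp)
          have hjoin_ne : pvJoin [' '] (c' :: cs') ≠ [] := pvJoin_ne _ _ _ hc'.1
          have step : pvJoin [' '] (c :: c' :: cs') = c ++ [' '] ++ pvJoin [' '] (c' :: cs') := by
            simp only [pvJoin]
          rw [step, List.map_append, List.map_append, List.append_assoc,
            pvJoin_split [0] (c.map pvSegB)
              ((([' '].map pvSegB)) ++ (pvJoin [' '] (c' :: cs')).map pvSegB)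
              (by simp [List.map_eq_nil_iff, hc.1])
              (by simp),
            hmapc]
          have inner : pvJoin ([0] : List Int)
              (([' '].map pvSegB) ++ (pvJoin [' '] (c' :: cs')).map pvSegB)
              = [0] ++ [0] ++ pvJoin [0] ((pvJoin [' '] (c' :: cs')).map pvSegB) := by
            rw [pvJoin_split [0] ([' '].map pvSegB) _ (by simp [pvSegB_space])
              (by simpa [List.map_eq_nil_iff] using hjoin_ne)]
            simp [pvSegB_space, pvJoin]
          rw [inner, ih hrest]
          have rhs : pvJoin ([0, 0, 0] : List Int)
              ((c :: c' :: cs').map (fun cs => pvJoin [0] (cs.map pvSeg)))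
              = pvJoin [0] (c.map pvSeg) ++ [0, 0, 0]
                ++ pvJoin [0, 0, 0] ((c' :: cs').map (fun cs => pvJoin [0] (cs.map pvSeg))) := by
            simp only [List.map_cons, pvJoin]
          rw [rhs]
          simp [List.append_assoc]

-- ===== VERDICT (by name: the statement is the Claim_ definition above) =====
theorem gen_timed_waveform_spec : Claim_equal_gen_timed_waveform := by
  intro tokens _ hpre
  unfold Spec_gen_timed_waveform gen_timed_waveform gen_timed_waveform_alt
  rw [pvOuterA_eq tokens.length tokens 0 [] (by simp), List.nil_append]
  simp only [PySem.Str.toList_join, chars_join_eq_pvJoin, List.map_map]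
  have htext : (tokens.map (String.toList ∘ fun t => (MORSE.get? (PySem.Str.upper t)).getD ""))
      = tokens.map pvCode := by
    simp [Function.comp, pvCode]
  rw [htext]
  rw [show (" " : String).toList = [' '] from rfl, show ("0" : String).toList = ['0'] from rfl]
  rw [pvJoin_map]
  have hseg : List.map (List.map (fun d => (PySem.Int.ofStr? (String.ofList [d])).getD 0))
        (List.map (String.toList ∘ fun ch => (SEG.get? (String.ofList [ch])).getD "")
          (pvJoin [' '] (tokens.map pvCode)))
      = (pvJoin [' '] (tokens.map pvCode)).map pvSegB := by
    simp [List.map_map, Function.comp, pvSegB]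
  have h0 : (['0'].map (fun d => (PySem.Int.ofStr? (String.ofList [d])).getD 0)) = ([0] : List Int) := by
    decide
  rw [h0, hseg, show (tokens.map (fun t => pvJoin [0] ((pvCode t).map pvSeg)))
      = (tokens.map pvCode).map (fun cs => pvJoin ([0] : List Int) (cs.map pvSeg)) by
    simp [List.map_map, Function.comp]]
  exact (pvJoin_chars_eq (tokens.map pvCode) (by
    intro cs hcs
    obtain ⟨t, ht, rfl⟩ := List.mem_map.mp hcs
    exact pvCode_wf t (hpre t ht))).symm
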